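-- pv_equiv track=rewrite | github.com/LiuJingting0201/AVFINAL | scripts/sample_selector.py | analyze_available_tags
-- ===== SOURCE A (Python) =====
-- def analyze_available_tags(scenes):
--     all_tags = set()
--     for scene in scenes:
--         tags = scene["description"].split(";")
--         all_tags.update(tags)
--     weather_tags = [tag for tag in all_tags if tag.startswith("weather.")]
--     area_tags = [tag for tag in all_tags if tag.startswith("area.")]
--     lighting_tags = [tag for tag in all_tags if tag.startswith("lighting.")]
--     structure_tags = [tag for tag in all_tags if tag.startswith("structure.")]
--     construction_tags = [tag for tag in all_tags if tag.startswith("construction.")]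
--     return {
--         "weather": sorted(weather_tags),
--         "area": sorted(area_tags),
--         "lighting": sorted(lighting_tags),
--         "structure": sorted(structure_tags),
--         "construction": sorted(construction_tags),
--         "all": sorted(all_tags)
--     }
-- ===== SOURCE B (Python) =====
-- def analyze_available_tags(scenes):
--     all_tags = set()
--     for scene in scenes:
--         all_tags.update(scene["description"].split(";"))
--     all_sorted = sorted(all_tags)
--     buckets = {"weather": [], "area": [], "lighting": [], "structure": [],
--                "construction": []}
--     for tag in all_sorted:
--         head, dot, _ = tag.partition(".")
--         if dot and head in buckets:
--             buckets[head].append(tag)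
--     buckets["all"] = all_sorted
--     return buckets
-- ===== Notes on version B (the rewrite author's own statement) =====
-- stated objective: alternative
-- what changed: Instead of five prefix-filtering scans each followed by its own sort, B sorts the deduplicated tag set once and makes a single pass over the sorted list, dispatching each tag by its partition-before-first-dot head into a dict of buckets, which are therefore already sorted and need no per-bucket sorting.
import Mathlib
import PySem

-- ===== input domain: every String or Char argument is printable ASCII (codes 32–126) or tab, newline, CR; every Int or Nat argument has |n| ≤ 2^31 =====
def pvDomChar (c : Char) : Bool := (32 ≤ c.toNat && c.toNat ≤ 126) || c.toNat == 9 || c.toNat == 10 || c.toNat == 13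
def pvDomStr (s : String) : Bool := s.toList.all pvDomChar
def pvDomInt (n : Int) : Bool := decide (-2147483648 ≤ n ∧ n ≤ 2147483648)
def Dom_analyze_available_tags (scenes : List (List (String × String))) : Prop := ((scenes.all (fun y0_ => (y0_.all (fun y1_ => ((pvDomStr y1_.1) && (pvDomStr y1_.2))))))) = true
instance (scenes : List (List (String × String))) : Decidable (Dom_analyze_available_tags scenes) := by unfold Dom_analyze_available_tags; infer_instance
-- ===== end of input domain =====

-- B sorts the tag set once and fills the category buckets in one dispatch pass over the sorted list (buckets come out sorted), instead of A's five prefix-filter scans each with its own sort; same cost, different algorithm.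

-- ===== PORT A =====
-- scene["description"]: first-match lookup in the association list (Python dict access); "" is never used under Pre_.
def pvLookup (scene : List (String × String)) : String :=
  ((scene.find? (fun p => p.1 == "description")).map Prod.snd).getD ""

def analyze_available_tags (scenes : List (List (String × String))) : List (String × List String) :=
  let all_tags : PySem.Set String := scenes.foldl
    (fun acc scene => PySem.Set.update acc ((PySem.Str.split? (pvLookup scene) ";").getD []))
    PySem.Set.empty
  let weather_tags := all_tags.filter (fun tag => PySem.Str.startswith tag "weather.")
  let area_tags := all_tags.filter (fun tag => PySem.Str.startswith tag "area.")
  let lighting_tags := all_tags.filter (fun tag => PySem.Str.startswith tag "lighting.")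
  let structure_tags := all_tags.filter (fun tag => PySem.Str.startswith tag "structure.")
  let construction_tags := all_tags.filter (fun tag => PySem.Str.startswith tag "construction.")
  [("weather", PySem.List.sorted weather_tags (fun x => x) false),
   ("area", PySem.List.sorted area_tags (fun x => x) false),
   ("lighting", PySem.List.sorted lighting_tags (fun x => x) false),
   ("structure", PySem.List.sorted structure_tags (fun x => x) false),
   ("construction", PySem.List.sorted construction_tags (fun x => x) false),
   ("all", PySem.List.sorted all_tags (fun x => x) false)]

-- ===== PORT B =====
-- tag.partition(".")[0]: everything before the first '.'; exact because the separator is a single character.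
def pvHead (t : String) : String := String.ofList (t.toList.takeWhile (fun c => !(c == '.')))
-- tag.partition(".")[1] is truthy iff '.' occurs in the tag
def pvHasDot (t : String) : Bool := t.toList.contains '.'

def pvStep (d : PySem.Dict String (List String)) (tag : String) : PySem.Dict String (List String) :=
  if pvHasDot tag && d.contains (pvHead tag) then d.modify (pvHead tag) [] (· ++ [tag]) else d

def analyze_available_tags_alt (scenes : List (List (String × String))) : List (String × List String) :=
  let all_tags : PySem.Set String := scenes.foldl
    (fun acc scene => PySem.Set.update acc ((PySem.Str.split? (pvLookup scene) ";").getD []))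
    PySem.Set.empty
  let all_sorted := PySem.List.sorted all_tags (fun x => x) false
  let buckets0 : PySem.Dict String (List String) := PySem.Dict.mk
    [("weather", []), ("area", []), ("lighting", []), ("structure", []), ("construction", [])]
  let buckets := all_sorted.foldl pvStep buckets0
  (PySem.Dict.insert buckets "all" all_sorted).items

-- ===== PRECONDITION & SPEC =====
-- Pre_ excludes exactly the inputs where A raises KeyError: a scene without a "description" key.
def Pre_analyze_available_tags (scenes : List (List (String × String))) : Prop :=
  ∀ scene ∈ scenes, scene.any (fun p => p.1 == "description") = true
instance (scenes : List (List (String × String))) : Decidable (Pre_analyze_available_tags scenes) := by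
  unfold Pre_analyze_available_tags; infer_instance
def pvWitness_analyze_available_tags : (List (List (String × String))) :=
  [[("description", "weather.rain;area.urban;plain")], [("description", "weather.rain;lighting.day")]]

def Spec_analyze_available_tags (scenes : List (List (String × String))) (out : List (String × List String)) : Prop := out = analyze_available_tags_alt scenes
instance (scenes : List (List (String × String))) (out : List (String × List String)) : Decidable (Spec_analyze_available_tags scenes out) := by unfold Spec_analyze_available_tags; infer_instance

-- ===== CLAIM (what is proved, stated in full; the proofs are below) =====
def Claim_equal_analyze_available_tags : Prop := ∀ (scenes : List (List (String × String))), Dom_analyze_available_tags scenes → Pre_analyze_available_tags scenes → Spec_analyze_available_tags scenes (analyze_available_tags scenes)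

-- ===== LEMMAS AND PROOFS =====

-- partition head characterises startswith (p ++ "."), for a dot-free prefix p
theorem headdot (p : List Char) (hp : '.' ∉ p) (l : List Char) :
    (p ++ ['.'] <+: l) ↔ (l.takeWhile (fun c => !(c == '.')) = p ∧ '.' ∈ l) := by
  induction p generalizing l with
  | nil =>
    cases l with
    | nil => simp
    | cons c t =>
      by_cases hc : c = '.'
      · subst hc; simp
      · simp [List.cons_prefix_cons, hc, Ne.symm hc]
  | cons c p ih =>
    have hc : c ≠ '.' := fun h => hp (h ▸ List.mem_cons_self)
    have hp' : '.' ∉ p := fun h => hp (List.mem_cons_of_mem _ h)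
    cases l with
    | nil => simp
    | cons b t =>
      simp only [List.cons_append, List.cons_prefix_cons, List.takeWhile_cons, List.mem_cons]
      constructor
      · rintro ⟨rfl, h⟩
        rw [if_pos (by simp [hc])]
        have h2 := (ih hp' t).mp h
        exact ⟨by rw [h2.1], Or.inr h2.2⟩
      · rintro ⟨h1, h2⟩
        by_cases hb : b = '.'
        · rw [if_neg (by simp [hb])] at h1
          exact absurd h1.symm (List.cons_ne_nil _ _)
        · rw [if_pos (by simp [hb])] at h1
          injection h1 with hbc htw
          refine ⟨hbc.symm, (ih hp' t).mpr ⟨htw, ?_⟩⟩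
          cases h2 with
          | inl h => exact absurd h.symm hb
          | inr h => exact h

theorem match_k (k : String) (hk : '.' ∉ k.toList) (t : String) :
    (pvHasDot t && (pvHead t == k)) = PySem.Str.startswith t (k ++ ".") := by
  rw [Bool.eq_iff_iff]
  have htl : (k ++ ".").toList = k.toList ++ ['.'] := by
    simp [String.toList_append]
  simp only [PySem.Str.startswith_eq, PySem.Chars.startswith_iff, htl, headdot k.toList hk,
    Bool.and_eq_true, beq_iff_eq, pvHasDot, pvHead, List.contains_eq_mem, decide_eq_true_eq]
  constructor
  · rintro ⟨h1, h2⟩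
    refine ⟨?_, h1⟩
    have := congrArg String.toList h2
    simpa using this
  · rintro ⟨h1, h2⟩
    exact ⟨h2, by rw [h1, String.ofList_toList]⟩

-- the dispatch fold over the five-bucket dict, characterised
theorem fold_buckets (ts : List String) (w a l s c : List String) :
    ts.foldl pvStep (PySem.Dict.mk
        [("weather", w), ("area", a), ("lighting", l), ("structure", s), ("construction", c)]) =
      PySem.Dict.mk
      [("weather", w ++ ts.filter (fun t => pvHasDot t && (pvHead t == "weather"))),
       ("area", a ++ ts.filter (fun t => pvHasDot t && (pvHead t == "area"))),
       ("lighting", l ++ ts.filter (fun t => pvHasDot t && (pvHead t == "lighting"))),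
       ("structure", s ++ ts.filter (fun t => pvHasDot t && (pvHead t == "structure"))),
       ("construction", c ++ ts.filter (fun t => pvHasDot t && (pvHead t == "construction")))] := by
  induction ts generalizing w a l s c with
  | nil => simp
  | cons t ts ih =>
    simp only [List.foldl_cons, List.filter_cons, pvStep, PySem.Dict.modify, PySem.Dict.insert,
      PySem.Dict.contains, PySem.Dict.getD, PySem.Dict.get?, PySem.Dict.items]
    by_cases hd : pvHasDot t
    · simp only [hd, Bool.true_and]
      by_cases h1 : pvHead t = "weather"
      · simp [h1, ih]
      · by_cases h2 : pvHead t = "area"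
        · simp [h2, ih]
        · by_cases h3 : pvHead t = "lighting"
          · simp [h3, ih]
          · by_cases h4 : pvHead t = "structure"
            · simp [h4, ih]
            · by_cases h5 : pvHead t = "construction"
              · simp [h5, ih]
              · have g1 : ("weather" : String) ≠ pvHead t := fun h => h1 h.symm
                have g2 : ("area" : String) ≠ pvHead t := fun h => h2 h.symm
                have g3 : ("lighting" : String) ≠ pvHead t := fun h => h3 h.symm
                have g4 : ("structure" : String) ≠ pvHead t := fun h => h4 h.symm
                have g5 : ("construction" : String) ≠ pvHead t := fun h => h5 h.symm
                simp [g1, g2, g3, g4, g5, h1, h2, h3, h4, h5, ih]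
    · simp only [Bool.not_eq_true] at hd
      simp [hd, ih]

-- the tag set is duplicate-free
theorem nodup_build (scenes : List (List (String × String))) (s : PySem.Set String)
    (hs : s.Nodup) :
    (scenes.foldl
      (fun acc scene => PySem.Set.update acc ((PySem.Str.split? (pvLookup scene) ";").getD []))
      s).Nodup := by
  induction scenes generalizing s with
  | nil => exact hs
  | cons sc scs ih => exact ih _ (PySem.Set.nodup_update _ _ hs)

-- sorting commutes with filtering, on a duplicate-free list
theorem sorted_filter (xs : List String) (hnd : xs.Nodup) (q : String → Bool) :
    PySem.List.sorted (xs.filter q) (fun x => x) false =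
      (PySem.List.sorted xs (fun x => x) false).filter q := by
  apply PySem.List.sorted_eq_of_perm_of_pairwise_lt
  · exact (PySem.List.sorted_perm xs (fun x => x) false).filter q
  · have hle := PySem.List.sorted_pairwise (xs := xs) (key := fun x => x)
    have hnd' : (PySem.List.sorted xs (fun x => x) false).Nodup :=
      (PySem.List.sorted_perm xs (fun x => x) false).nodup_iff.mpr hnd
    have hlt : (PySem.List.sorted xs (fun x => x) false).Pairwise (fun a b => a < b) :=
      (hle.and hnd').imp (fun h => lt_of_le_of_ne h.1 h.2)
    exact hlt.filter q

-- ===== VERDICT (by name: the statement is the Claim_ definition above) =====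
theorem analyze_available_tags_spec : Claim_equal_analyze_available_tags := by
  intro scenes _ _
  unfold Spec_analyze_available_tags analyze_available_tags analyze_available_tags_alt
  have hnd : (scenes.foldl
      (fun acc scene => PySem.Set.update acc ((PySem.Str.split? (pvLookup scene) ";").getD []))
      PySem.Set.empty).Nodup := nodup_build scenes _ (by simp [PySem.Set.empty])
  simp only [fold_buckets, List.nil_append]
  simp only [PySem.Dict.insert, PySem.Dict.contains]
  simp only [match_k "weather" (by decide), match_k "area" (by decide),
    match_k "lighting" (by decide), match_k "structure" (by decide),
    match_k "construction" (by decide)]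
  simp only [← sorted_filter _ hnd]
  simp
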